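-- pv_equiv track=rewrite | github.com/vekoLSU/AI-Texas-Holdem-CSC4444 | hand_evaluator.py | has_straight_draw
-- ===== SOURCE A (Python) =====
-- from typing import Any, Dict, List, Tuple, Union
-- import itertools
--
-- def has_straight_draw(ranks: List[int]) -> bool:
--     """Check if there's a straight draw"""
--     unique_ranks = sorted(set(ranks))
--
--     # Check for 4 in a row
--     for i in range(len(unique_ranks) - 3):
--         if unique_ranks[i+3] - unique_ranks[i] == 3:
--             return True
--
--     # Check for gaps that could be filled
--     if len(unique_ranks) >= 4:
--         for combo in itertools.combinations(unique_ranks, 4):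
--             sorted_combo = sorted(combo)
--             if sorted_combo[-1] - sorted_combo[0] <= 4:
--                 return True
--
--     return False
-- ===== SOURCE B (Python) =====
-- def has_straight_draw(ranks):
--     """Check if there's a straight draw: after sort+dedup, some quadruple of
--     distinct ranks spans at most 4, which happens iff some consecutive
--     quadruple in the sorted unique list spans at most 4 (one zip-scan)."""
--     u = sorted(set(ranks))
--     return any(hi - lo <= 4 for lo, hi in zip(u, u[3:]))
-- ===== Notes on version B (the rewrite author's own statement) =====
-- stated objective: alternative
-- what changed: Replaced the enumeration of all 4-element combinations (plus the separate 4-in-a-row pass) by a single linear zip-scan over the sorted deduplicated ranks checking consecutive quadruples of span <= 4, which is equivalent because the tightest 4-subset of a sorted list is consecutive.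
import Mathlib
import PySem

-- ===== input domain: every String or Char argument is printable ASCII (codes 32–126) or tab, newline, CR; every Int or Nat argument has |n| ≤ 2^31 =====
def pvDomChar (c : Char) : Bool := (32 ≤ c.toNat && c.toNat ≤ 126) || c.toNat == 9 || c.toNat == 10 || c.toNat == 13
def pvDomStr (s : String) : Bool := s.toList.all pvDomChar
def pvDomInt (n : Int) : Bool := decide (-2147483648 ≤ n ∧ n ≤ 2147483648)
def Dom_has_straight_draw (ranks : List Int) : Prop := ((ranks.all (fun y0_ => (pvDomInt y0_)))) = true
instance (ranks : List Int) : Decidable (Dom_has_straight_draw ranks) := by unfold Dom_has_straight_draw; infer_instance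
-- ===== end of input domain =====

-- B replaces A's enumeration of all 4-combinations (plus the separate 4-in-a-row pass) by one
-- linear zip-scan of consecutive quadruples over the sorted deduplicated ranks (same result).


-- ===== PORT A =====
def has_straight_draw (ranks : List Int) : Bool :=
  let unique_ranks := PySem.List.sorted (PySem.Set.ofList ranks) (fun x => x) false
  -- for i in range(len(unique_ranks) - 3): if unique_ranks[i+3] - unique_ranks[i] == 3: return True
  if (PySem.List.pyRange 0 ((unique_ranks.length : Int) - 3) 1).any (fun i =>
       PySem.List.pyGetD unique_ranks (i + 3) 0 - PySem.List.pyGetD unique_ranks i 0 == 3)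
  then true
  else if 4 ≤ unique_ranks.length then
    -- for combo in itertools.combinations(unique_ranks, 4): if sorted(combo)[-1] - sorted(combo)[0] <= 4: return True
    (PySem.List.combinations unique_ranks 4).any (fun combo =>
      let sorted_combo := PySem.List.sorted combo (fun x => x) false
      PySem.List.pyGetD sorted_combo (-1) 0 - PySem.List.pyGetD sorted_combo 0 0 ≤ 4)
  else false

-- ===== PORT B =====
def has_straight_draw_alt (ranks : List Int) : Bool :=
  let u := PySem.List.sorted (PySem.Set.ofList ranks) (fun x => x) false
  -- any(hi - lo <= 4 for lo, hi in zip(u, u[3:]))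
  (u.zip (PySem.List.slice u (some 3) none)).any (fun p => p.2 - p.1 ≤ 4)

-- ===== PRECONDITION & SPEC =====
def Spec_has_straight_draw (ranks : List Int) (out : Bool) : Prop := out = has_straight_draw_alt ranks
instance (ranks : List Int) (out : Bool) : Decidable (Spec_has_straight_draw ranks out) := by unfold Spec_has_straight_draw; infer_instance

-- ===== CLAIM (what is proved, stated in full; the proofs are below) =====
def Claim_equal_has_straight_draw : Prop := ∀ (ranks : List Int), Dom_has_straight_draw ranks → Spec_has_straight_draw ranks (has_straight_draw ranks)

-- ===== LEMMAS AND PROOFS =====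

/-- The common characterisation: some consecutive quadruple of `u` spans at most 4. -/
def goodAt (u : List Int) : Prop := ∃ (i : Nat) (h : i + 3 < u.length), u[i + 3] - u[i] ≤ 4

/-- B's zip-scan decides `goodAt`. -/
lemma B_iff (u : List Int) :
    ((u.zip (PySem.List.slice u (some 3) none)).any (fun p => p.2 - p.1 ≤ 4) = true) ↔ goodAt u := by
  rw [show PySem.List.slice u (some 3) none = u.drop 3 by
        simpa using PySem.List.slice_from u (a := 3) (by omega)]
  rw [List.any_eq_true]
  constructor
  · rintro ⟨p, hp, hle⟩
    obtain ⟨i, hi, hpi⟩ := List.mem_iff_getElem.1 hp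
    have hilt : i < u.length - 3 := by
      have := hi; simp only [List.length_zip, List.length_drop, lt_min_iff] at this; omega
    have hz := List.getElem_zip (l := u) (l' := u.drop 3) (i := i) (h := hi)
    rw [hpi] at hz
    rw [hz] at hle
    simp only [List.getElem_drop] at hle
    refine ⟨i, by omega, ?_⟩
    have := of_decide_eq_true hle
    simpa [Nat.add_comm 3 i] using this
  · rintro ⟨i, h3, hle⟩
    have hzl : i < (u.zip (u.drop 3)).length := by
      simp only [List.length_zip, List.length_drop, lt_min_iff]; omega
    refine ⟨(u.zip (u.drop 3))[i]'hzl, List.getElem_mem hzl, ?_⟩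
    have hz := List.getElem_zip (l := u) (l' := u.drop 3) (i := i) (h := hzl)
    rw [hz]
    simp only [List.getElem_drop]
    exact decide_eq_true (by simpa [Nat.add_comm 3 i] using hle)

/-- A consecutive quadruple of `u` is one of the 4-combinations of `u`. -/
lemma quad_mem_combos (u : List Int) (i : Nat) (h : i + 3 < u.length) :
    [u[i]'(by omega), u[i+1]'(by omega), u[i+2]'(by omega), u[i+3]'h]
      ∈ PySem.List.combinations u 4 := by
  rw [PySem.List.mem_combinations_iff]
  refine ⟨?_, rfl⟩
  have heq : (u.drop i).take 4 = [u[i]'(by omega), u[i+1]'(by omega), u[i+2]'(by omega), u[i+3]'h] := by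
    apply List.ext_getElem
    · simp; omega
    · intro j hj hj'
      simp only [List.length_take, List.length_drop, lt_min_iff] at hj
      rw [List.getElem_take, List.getElem_drop]
      simp only [List.length_cons, List.length_nil] at hj'
      interval_cases j <;> simp [Nat.add_comm i]
  rw [← heq]
  exact (List.take_sublist _ _).trans (List.drop_sublist _ _)

/-- Monotonicity of indexing into a strictly increasing list. -/
lemma getElem_mono (u : List Int) (hu : u.Pairwise (· < ·)) (p q : Nat) (hq : q < u.length)
    (hpq : p ≤ q) : u[p]'(by omega) ≤ u[q]'hq := by
  rcases Nat.lt_or_ge p q with hlt | hge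
  · exact le_of_lt (List.pairwise_iff_getElem.1 hu p q (by omega) hq hlt)
  · have : p = q := by omega
    subst this; rfl

/-- Any 4-element sublist of span ≤ 4 in a strictly increasing list forces a
consecutive quadruple of span ≤ 4. -/
lemma combo_to_goodAt (u : List Int) (hu : u.Pairwise (· < ·)) (a b cc d : Int)
    (hsub : [a, b, cc, d].Sublist u) (hspan : d - a ≤ 4) : goodAt u := by
  obtain ⟨f, hf⟩ := List.sublist_iff_exists_fin_orderEmbedding_get_eq.1 hsub
  have h01 : f ⟨0, by simp⟩ < f ⟨1, by simp⟩ := f.strictMono (Fin.mk_lt_mk.mpr (by omega))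
  have h12 : f ⟨1, by simp⟩ < f ⟨2, by simp⟩ := f.strictMono (Fin.mk_lt_mk.mpr (by omega))
  have h23 : f ⟨2, by simp⟩ < f ⟨3, by simp⟩ := f.strictMono (Fin.mk_lt_mk.mpr (by omega))
  rw [Fin.lt_def] at h01 h12 h23
  have hlt3 : ((f ⟨3, by simp⟩ : Fin u.length) : Nat) < u.length := (f ⟨3, by simp⟩).isLt
  have hi3 : ((f ⟨0, by simp⟩ : Fin u.length) : Nat) + 3 < u.length := by omega
  refine ⟨((f ⟨0, by simp⟩ : Fin u.length) : Nat), hi3, ?_⟩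
  have ha : u[((f ⟨0, by simp⟩ : Fin u.length) : Nat)]'(by omega) = a := by
    have := hf ⟨0, by simp⟩
    simpa [List.get_eq_getElem] using this.symm
  have hd : u[((f ⟨3, by simp⟩ : Fin u.length) : Nat)]'hlt3 = d := by
    have := hf ⟨3, by simp⟩
    simpa [List.get_eq_getElem] using this.symm
  have hmono := getElem_mono u hu (((f ⟨0, by simp⟩ : Fin u.length) : Nat) + 3)
    ((f ⟨3, by simp⟩ : Fin u.length) : Nat) hlt3 (by omega)
  rw [hd] at hmono
  rw [ha]
  omega

/-- A strictly increasing list is unchanged by Python's `sorted`. -/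
lemma sorted_fixed (c : List Int) (hc : c.Pairwise (· < ·)) :
    PySem.List.sorted c (fun x => x) false = c :=
  PySem.List.sorted_eq_of_perm_of_pairwise_lt c c (fun x => x) (List.Perm.refl c) hc

/-- A's two passes decide `goodAt` on the strictly increasing list `u`. -/
lemma A_iff (u : List Int) (hu : u.Pairwise (· < ·)) :
    ((if (PySem.List.pyRange 0 ((u.length : Int) - 3) 1).any (fun i =>
          PySem.List.pyGetD u (i + 3) 0 - PySem.List.pyGetD u i 0 == 3)
      then true
      else if 4 ≤ u.length then
        (PySem.List.combinations u 4).any (fun combo =>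
          let sorted_combo := PySem.List.sorted combo (fun x => x) false
          PySem.List.pyGetD sorted_combo (-1) 0 - PySem.List.pyGetD sorted_combo 0 0 ≤ 4)
      else false) = true) ↔ goodAt u := by
  constructor
  · intro h
    split_ifs at h with h1 h2
    · -- first pass hit: consecutive quadruple with difference exactly 3
      obtain ⟨i, hi, heq⟩ := List.any_eq_true.1 h1
      rw [PySem.List.mem_pyRange_one] at hi
      obtain ⟨hi0, hilt⟩ := hi
      have hnat : i.toNat + 3 < u.length := by omega
      have e1 : PySem.List.pyGetD u (i + 3) 0 = u[i.toNat + 3]'hnat := by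
        have := PySem.List.pyGetD_eq_getElem u (i := i + 3) 0 (by omega) (by omega)
        simpa [Int.toNat_add (by omega : (0:Int) ≤ i)] using this
      have e2 : PySem.List.pyGetD u i 0 = u[i.toNat]'(by omega) :=
        PySem.List.pyGetD_eq_getElem u 0 (by omega) (by omega)
      rw [e1, e2] at heq
      exact ⟨i.toNat, hnat, by have := of_decide_eq_true heq; omega⟩
    · -- second pass hit: some 4-combination of span ≤ 4
      obtain ⟨combo, hmem, hle⟩ := List.any_eq_true.1 h
      obtain ⟨hsub, hlen⟩ := (PySem.List.mem_combinations_iff u 4 combo).1 hmem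
      obtain ⟨a, b, cc, d, rfl⟩ : ∃ a b cc d, combo = [a, b, cc, d] := by
        rcases combo with _ | ⟨a, t⟩; · simp at hlen
        rcases t with _ | ⟨b, t⟩; · simp at hlen
        rcases t with _ | ⟨cc, t⟩; · simp at hlen
        rcases t with _ | ⟨d, t⟩; · simp at hlen
        rcases t with _ | ⟨e, t⟩
        · exact ⟨a, b, cc, d, rfl⟩
        · simp at hlen
      have hcp : ([a, b, cc, d] : List Int).Pairwise (· < ·) := List.Pairwise.sublist hsub hu
      simp only [sorted_fixed _ hcp] at hle
      have e1 : PySem.List.pyGetD ([a, b, cc, d] : List Int) (-1) 0 = d := by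
        simpa using PySem.List.pyGetD_neg_one_append_singleton ([a, b, cc] : List Int) d 0
      have e2 : PySem.List.pyGetD ([a, b, cc, d] : List Int) 0 0 = a :=
        PySem.List.pyGetD_zero_cons a [b, cc, d] 0
      rw [e1, e2] at hle
      exact combo_to_goodAt u hu a b cc d hsub (of_decide_eq_true hle)
  · rintro ⟨i, hi, hle⟩
    split_ifs with h1 h2
    · rfl
    · -- the consecutive quadruple is itself a combination of span ≤ 4
      apply List.any_eq_true.2
      refine ⟨[u[i]'(by omega), u[i+1]'(by omega), u[i+2]'(by omega), u[i+3]'hi],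
        quad_mem_combos u i hi, ?_⟩
      have hcp : ([u[i]'(by omega), u[i+1]'(by omega), u[i+2]'(by omega), u[i+3]'hi] :
          List Int).Pairwise (· < ·) :=
        List.Pairwise.sublist ((PySem.List.mem_combinations_iff u 4 _).1 (quad_mem_combos u i hi)).1 hu
      simp only [sorted_fixed _ hcp]
      have e1 : PySem.List.pyGetD [u[i]'(by omega), u[i+1]'(by omega), u[i+2]'(by omega),
          u[i+3]'hi] (-1) 0 = u[i+3]'hi := by
        simpa using PySem.List.pyGetD_neg_one_append_singleton
          ([u[i]'(by omega), u[i+1]'(by omega), u[i+2]'(by omega)] : List Int) (u[i+3]'hi) 0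
      have e2 : PySem.List.pyGetD [u[i]'(by omega), u[i+1]'(by omega), u[i+2]'(by omega),
          u[i+3]'hi] 0 0 = u[i]'(by omega) :=
        PySem.List.pyGetD_zero_cons _ _ 0
      rw [e1, e2]
      exact decide_eq_true hle
    · exact absurd hi (by omega)

-- ===== VERDICT (by name: the statement is the Claim_ definition above) =====
theorem has_straight_draw_spec : Claim_equal_has_straight_draw := by
  intro ranks _
  show has_straight_draw ranks = has_straight_draw_alt ranks
  unfold has_straight_draw has_straight_draw_alt
  have hsorted := PySem.List.sorted_ofList_pairwise_lt (κ := Int) ranks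
  exact Bool.eq_iff_iff.mpr
    ⟨fun h => (B_iff _).2 ((A_iff _ hsorted).1 h),
     fun h => (A_iff _ hsorted).2 ((B_iff _).1 h)⟩
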